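-- pv_equiv track=rewrite | github.com/XakNitram/RogueDungeonsTests | cellmath.py | crumble
-- ===== SOURCE A (Python) =====
-- from typing import Iterable, Tuple
--
-- def crumble(lower: int, upper: int, start: int = None) -> Iterable[int]:
--     """Return number n above and n below the start index
--     where n is incremented until both bounds are exceeded.
--
--     If start is omitted, acts like range.
--     """
--     if start is None:
--         start = lower
--
--     if not lower <= start < upper:
--         yield start
--         return
--
--     finished_upper = False
--     finished_lower = False
--     count = 1
--     yield start
--     while not (finished_upper and finished_lower):
--         if not start + count >= upper:
--             yield start + count
--         else:
--             finished_upper = True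
--
--         if not start - count < lower:
--             yield start - count
--         else:
--             finished_lower = True
--
--         count += 1
-- ===== SOURCE B (Python) =====
-- def crumble(lower: int, upper: int, start: int = None):
--     """Yield start, then every in-bounds value ordered by distance from start,
--     upper side first on ties — computed by sorting the whole range by that key
--     instead of emitting values incrementally."""
--     if start is None:
--         start = lower
--     if not lower <= start < upper:
--         yield start
--         return
--     yield from sorted(range(lower, upper), key=lambda v: 2 * abs(v - start) + (v < start))
-- ===== Notes on version B (the rewrite author's own statement) =====
-- stated objective: alternative
-- what changed: Replaced A's incremental count/finished-flag emission loop with a single sort of range(lower, upper) keyed by 2*abs(v-start)+(v<start), i.e. distance from start with the upper side first on ties.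
import Mathlib
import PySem

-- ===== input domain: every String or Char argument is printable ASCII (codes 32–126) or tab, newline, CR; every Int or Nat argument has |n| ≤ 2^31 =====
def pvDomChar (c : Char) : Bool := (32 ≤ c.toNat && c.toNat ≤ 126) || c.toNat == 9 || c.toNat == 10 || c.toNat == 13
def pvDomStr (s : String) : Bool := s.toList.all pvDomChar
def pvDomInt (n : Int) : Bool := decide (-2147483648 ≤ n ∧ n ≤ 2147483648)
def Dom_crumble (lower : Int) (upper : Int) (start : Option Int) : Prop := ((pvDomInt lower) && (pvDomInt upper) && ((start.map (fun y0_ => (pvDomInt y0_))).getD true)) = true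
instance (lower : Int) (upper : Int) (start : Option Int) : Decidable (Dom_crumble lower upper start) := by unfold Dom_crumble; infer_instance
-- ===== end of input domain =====

-- B replaces A's incremental count/finished-flag emission loop by one sort of the whole
-- range keyed on distance-from-start (upper side first on ties); alternative algorithm, same output.

-- ===== PORT A =====
-- A's while loop: each round yields start+count (unless it hit upper, setting finished_upper)
-- then start-count (unless it hit lower, setting finished_lower); stops when both flags are set.
-- 'fuel' is a plain totality guard (crumble passes enough for the loop to finish; the loop's own
-- exit condition 'fu && fl' is unchanged).
def crumbleLoopA (l u s : Int) : Bool → Bool → Int → Nat → List Int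
  | _, _, _, 0 => []
  | fu, fl, c, fuel + 1 =>
    if fu && fl then []
    else if ¬ (s + c ≥ u) then
      (s + c) ::
        (if ¬ (s - c < l) then (s - c) :: crumbleLoopA l u s fu fl (c + 1) fuel
         else crumbleLoopA l u s fu true (c + 1) fuel)
    else
      (if ¬ (s - c < l) then (s - c) :: crumbleLoopA l u s true fl (c + 1) fuel
       else crumbleLoopA l u s true true (c + 1) fuel)

def crumble (lower : Int) (upper : Int) (start : Option Int) : List Int :=
  let s := start.getD lower
  if ¬ (lower ≤ s ∧ s < upper) then [s]
  else s :: crumbleLoopA lower upper s false false 1 (upper - lower).toNat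

-- ===== PORT B =====
-- B's sort key: 2*abs(v - start) + (v < start), one Int (Python's bool coerces to 0/1)
def crumbleKey (s v : Int) : Int := 2 * ((v - s).natAbs : Int) + (if v < s then 1 else 0)

def crumble_alt (lower : Int) (upper : Int) (start : Option Int) : List Int :=
  let s := start.getD lower
  if ¬ (lower ≤ s ∧ s < upper) then [s]
  else PySem.List.sorted (PySem.List.pyRange lower upper 1) (crumbleKey s) false

-- ===== PRECONDITION & SPEC =====
def Spec_crumble (lower : Int) (upper : Int) (start : Option Int) (out : List Int) : Prop := out = crumble_alt lower upper start
instance (lower : Int) (upper : Int) (start : Option Int) (out : List Int) : Decidable (Spec_crumble lower upper start out) := by unfold Spec_crumble; infer_instance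

-- ===== CLAIM =====
def Claim_equal_crumble : Prop := ∀ (lower : Int) (upper : Int) (start : Option Int), Dom_crumble lower upper start → Spec_crumble lower upper start (crumble lower upper start)

-- ===== LEMMAS AND PROOFS =====

-- alternating merge of two lists (the order A's loop emits in)
def zlMerge : List Int → List Int → List Int
  | [], ds => ds
  | u :: us, [] => u :: zlMerge us []
  | u :: us, d :: ds => u :: d :: zlMerge us ds

theorem zlMerge_nil_right (xs : List Int) : zlMerge xs [] = xs := by
  induction xs with
  | nil => rfl
  | cons x xs ih => simp [zlMerge, ih]

theorem zlMerge_perm_append (us ds : List Int) : (zlMerge us ds).Perm (us ++ ds) := by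
  induction us generalizing ds with
  | nil => simp [zlMerge]
  | cons u us ih =>
    cases ds with
    | nil => simp [zlMerge_nil_right]
    | cons d ds =>
      simp only [zlMerge, List.cons_append]
      refine List.Perm.cons u ?_
      exact ((ih ds).cons d).trans (List.perm_middle.symm)

theorem crumbleLoopA_eq_zl (l u s : Int) : ∀ (fuel : Nat) (fu fl : Bool) (c : Int),
    (fu = true → u ≤ s + c) → (fl = true → s - c < l) →
    ((fu = true ∧ fl = true) ∨ (u - s - c).toNat + (s - c - l + 1).toNat + 1 ≤ fuel) →
    crumbleLoopA l u s fu fl c fuel =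
      zlMerge (if fu then [] else PySem.List.pyRange (s + c) u 1)
              (if fl then [] else PySem.List.pyRange (s - c) (l - 1) (-1)) := by
  intro fuel
  induction fuel with
  | zero =>
    intro fu fl c hfu hfl hok
    obtain ⟨rfl, rfl⟩ : fu = true ∧ fl = true := by
      rcases hok with h | h
      · exact h
      · omega
    simp [crumbleLoopA, zlMerge]
  | succ fuel ih =>
    intro fu fl c hfu hfl hok
    by_cases hflag : fu = true ∧ fl = true
    · obtain ⟨rfl, rfl⟩ := hflag
      simp [crumbleLoopA, zlMerge]
    · have hok' : (u - s - c).toNat + (s - c - l + 1).toNat + 1 ≤ fuel + 1 := by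
        rcases hok with h | h
        · exact absurd h hflag
        · exact h
      have hg : ¬ (fu && fl) = true := by
        cases fu <;> cases fl <;> simp_all
      by_cases hup : s + c ≥ u
      · have hfu0' : (if fu = true then [] else PySem.List.pyRange (s + c) u 1) = ([] : List Int) := by
          cases fu <;> simp [PySem.List.pyRange_one_eq_nil (by omega : u ≤ s + c)]
        by_cases hdn : s - c < l
        · -- both sides exhausted: flags become true, loop is about to stop
          have hfl0' : (if fl = true then [] else PySem.List.pyRange (s - c) (l - 1) (-1)) = ([] : List Int) := by
            cases fl <;> simp [PySem.List.pyRange_neg_one_eq_nil (by omega : s - c ≤ l - 1)]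
          rw [show crumbleLoopA l u s fu fl c (fuel + 1)
                = crumbleLoopA l u s true true (c + 1) fuel by
              simp [crumbleLoopA, hg, hup, hdn]]
          rw [ih true true (c + 1) (fun _ => by omega) (fun _ => by omega) (Or.inl ⟨rfl, rfl⟩)]
          simp [hfu0', hfl0', zlMerge]
        · -- upper exhausted, lower side still emitting
          have hfl0 : fl = false := by
            cases fl
            · rfl
            · exact absurd (hfl rfl) (by omega)
          subst hfl0
          have hdcons : PySem.List.pyRange (s - c) (l - 1) (-1)
              = (s - c) :: PySem.List.pyRange (s - c - 1) (l - 1) (-1) :=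
            PySem.List.pyRange_neg_one_cons (by omega)
          rw [show crumbleLoopA l u s fu false c (fuel + 1)
                = (s - c) :: crumbleLoopA l u s true false (c + 1) fuel by
              simp [crumbleLoopA, hg, hup, hdn]]
          rw [ih true false (c + 1) (fun _ => by omega) (by simp) (Or.inr (by omega))]
          simp [hfu0', hdcons, zlMerge, show s - (c + 1) = s - c - 1 by ring]
      · have hfu0 : fu = false := by
          cases fu
          · rfl
          · exact absurd (hfu rfl) (by omega)
        subst hfu0
        have hcons : PySem.List.pyRange (s + c) u 1 = (s + c) :: PySem.List.pyRange (s + c + 1) u 1 :=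
          PySem.List.pyRange_one_cons (by omega)
        by_cases hdn : s - c < l
        · -- lower exhausted, upper side still emitting
          have hfl0' : (if fl = true then [] else PySem.List.pyRange (s - c) (l - 1) (-1)) = ([] : List Int) := by
            cases fl <;> simp [PySem.List.pyRange_neg_one_eq_nil (by omega : s - c ≤ l - 1)]
          rw [show crumbleLoopA l u s false fl c (fuel + 1)
                = (s + c) :: crumbleLoopA l u s false true (c + 1) fuel by
              simp [crumbleLoopA, hup, hdn]]
          rw [ih false true (c + 1) (by simp) (fun _ => by omega) (Or.inr (by omega))]
          simp [hfl0', hcons, zlMerge_nil_right, show s + (c + 1) = s + c + 1 by ring]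
        · -- both sides still emitting
          have hfl0 : fl = false := by
            cases fl
            · rfl
            · exact absurd (hfl rfl) (by omega)
          subst hfl0
          have hdcons : PySem.List.pyRange (s - c) (l - 1) (-1)
              = (s - c) :: PySem.List.pyRange (s - c - 1) (l - 1) (-1) :=
            PySem.List.pyRange_neg_one_cons (by omega)
          rw [show crumbleLoopA l u s false false c (fuel + 1)
                = (s + c) :: (s - c) :: crumbleLoopA l u s false false (c + 1) fuel by
              simp [crumbleLoopA, hup, hdn]]
          rw [ih false false (c + 1) (by simp) (by simp) (Or.inr (by omega))]
          simp [hcons, hdcons, zlMerge, show s + (c + 1) = s + c + 1 by ring,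
                show s - (c + 1) = s - c - 1 by ring]

-- the merged tail is strictly key-increasing, and all its keys are ≥ 2*c
theorem zl_pairwise (l u s : Int) : ∀ (n : Nat) (c : Int), 1 ≤ c →
    (u - s - c).toNat + (s - c - l + 1).toNat ≤ n →
    (zlMerge (PySem.List.pyRange (s + c) u 1) (PySem.List.pyRange (s - c) (l - 1) (-1))).Pairwise
        (fun a b => crumbleKey s a < crumbleKey s b)
    ∧ ∀ x ∈ zlMerge (PySem.List.pyRange (s + c) u 1) (PySem.List.pyRange (s - c) (l - 1) (-1)),
        2 * c ≤ crumbleKey s x := by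
  intro n
  induction n with
  | zero =>
    intro c hc hm
    rw [PySem.List.pyRange_one_eq_nil (by omega), PySem.List.pyRange_neg_one_eq_nil (by omega)]
    simp [zlMerge]
  | succ n ih =>
    intro c hc hm
    by_cases hup : s + c < u
    · have hcu : PySem.List.pyRange (s + c) u 1 = (s + c) :: PySem.List.pyRange (s + c + 1) u 1 :=
        PySem.List.pyRange_one_cons (by omega)
      have kc : crumbleKey s (s + c) = 2 * c := by
        simp only [crumbleKey]; split_ifs <;> omega
      by_cases hdn : l - 1 < s - c
      · have hcd : PySem.List.pyRange (s - c) (l - 1) (-1)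
            = (s - c) :: PySem.List.pyRange (s - c - 1) (l - 1) (-1) :=
          PySem.List.pyRange_neg_one_cons (by omega)
        have kd : crumbleKey s (s - c) = 2 * c + 1 := by
          simp only [crumbleKey]; split_ifs <;> omega
        obtain ⟨hp, hb⟩ := ih (c + 1) (by omega) (by omega)
        rw [show s + (c + 1) = s + c + 1 by ring, show s - (c + 1) = s - c - 1 by ring] at hp hb
        rw [hcu, hcd]
        simp only [zlMerge, List.pairwise_cons, List.mem_cons]
        refine ⟨⟨?_, ⟨?_, hp⟩⟩, ?_⟩
        · rintro a (rfl | ha)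
          · omega
          · have := hb a ha; omega
        · intro a ha; have := hb a ha; omega
        · rintro x (rfl | rfl | hx)
          · omega
          · omega
          · have := hb x hx; omega
      · have hcd : PySem.List.pyRange (s - c) (l - 1) (-1) = [] :=
          PySem.List.pyRange_neg_one_eq_nil (by omega)
        have hcd' : PySem.List.pyRange (s - c - 1) (l - 1) (-1) = [] :=
          PySem.List.pyRange_neg_one_eq_nil (by omega)
        obtain ⟨hp, hb⟩ := ih (c + 1) (by omega) (by omega)
        rw [show s + (c + 1) = s + c + 1 by ring, show s - (c + 1) = s - c - 1 by ring, hcd'] at hp hb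
        rw [hcu, hcd]
        simp only [zlMerge, List.pairwise_cons, List.mem_cons]
        refine ⟨⟨?_, hp⟩, ?_⟩
        · intro a ha; have := hb a ha; omega
        · rintro x (rfl | hx)
          · omega
          · have := hb x hx; omega
    · have hcu : PySem.List.pyRange (s + c) u 1 = [] :=
        PySem.List.pyRange_one_eq_nil (by omega)
      have hcu' : PySem.List.pyRange (s + c + 1) u 1 = [] :=
        PySem.List.pyRange_one_eq_nil (by omega)
      by_cases hdn : l - 1 < s - c
      · have hcd : PySem.List.pyRange (s - c) (l - 1) (-1)
            = (s - c) :: PySem.List.pyRange (s - c - 1) (l - 1) (-1) :=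
          PySem.List.pyRange_neg_one_cons (by omega)
        have kd : crumbleKey s (s - c) = 2 * c + 1 := by
          simp only [crumbleKey]; split_ifs <;> omega
        obtain ⟨hp, hb⟩ := ih (c + 1) (by omega) (by omega)
        rw [show s + (c + 1) = s + c + 1 by ring, show s - (c + 1) = s - c - 1 by ring, hcu'] at hp hb
        rw [hcu, hcd]
        simp only [zlMerge, List.pairwise_cons, List.mem_cons] at *
        refine ⟨⟨?_, hp⟩, ?_⟩
        · intro a ha; have := hb a ha; omega
        · rintro x (rfl | hx)
          · omega
          · have := hb x hx; omega
      · have hcd : PySem.List.pyRange (s - c) (l - 1) (-1) = [] :=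
          PySem.List.pyRange_neg_one_eq_nil (by omega)
        rw [hcu, hcd]; simp [zlMerge]

-- ===== VERDICT =====
theorem crumble_spec : Claim_equal_crumble := by
  intro lower upper start _
  unfold Spec_crumble crumble crumble_alt
  by_cases h : lower ≤ start.getD lower ∧ start.getD lower < upper
  · set s := start.getD lower with hs
    simp only [h]
    rw [crumbleLoopA_eq_zl lower upper s ((upper - lower).toNat) false false 1
        (by simp) (by simp) (Or.inr (by omega))]
    simp only [Bool.false_eq_true, reduceIte]
    set ups := PySem.List.pyRange (s + 1) upper 1 with hups
    set dns := PySem.List.pyRange (s - 1) (lower - 1) (-1) with hdns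
    have hperm : (s :: zlMerge ups dns).Perm (PySem.List.pyRange lower upper 1) := by
      have h2 : dns = (PySem.List.pyRange lower s 1).reverse := by
        rw [hdns, PySem.List.pyRange_neg_one_eq_reverse]
        norm_num
      have h3 : PySem.List.pyRange lower upper 1
          = PySem.List.pyRange lower s 1 ++ (s :: ups) := by
        rw [PySem.List.pyRange_one_append lower s upper h.1 (by omega),
            PySem.List.pyRange_one_cons h.2]
      rw [h3]
      have hdR : dns.Perm (PySem.List.pyRange lower s 1) := by
        rw [h2]; exact (PySem.List.pyRange lower s 1).reverse_perm
      have p1 : (s :: zlMerge ups dns).Perm (s :: (ups ++ dns)) :=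
        (zlMerge_perm_append ups dns).cons s
      have p2 : (s :: (ups ++ dns)).Perm (s :: (ups ++ PySem.List.pyRange lower s 1)) :=
        (hdR.append_left ups).cons s
      have p3 : (s :: (ups ++ PySem.List.pyRange lower s 1)).Perm
          (PySem.List.pyRange lower s 1 ++ (s :: ups)) := by
        simpa using List.perm_append_comm (l₁ := s :: ups) (l₂ := PySem.List.pyRange lower s 1)
      exact p1.trans (p2.trans p3)
    have hpw : (s :: zlMerge ups dns).Pairwise (fun a b => crumbleKey s a < crumbleKey s b) := by
      obtain ⟨hp, hb⟩ := zl_pairwise lower upper s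
        ((upper - s - 1).toNat + (s - 1 - lower + 1).toNat) 1 (by omega) (le_refl _)
      rw [List.pairwise_cons]
      refine ⟨?_, hp⟩
      intro a ha
      have h1 := hb a ha
      have : crumbleKey s s = 0 := by simp [crumbleKey]
      omega
    rw [PySem.List.sorted_eq_of_perm_of_pairwise_lt _ _ (crumbleKey s) hperm hpw]
  · simp [h]
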